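-- pv_equiv track=rewrite | github.com/ivankodaria5-ai/plsdonatebot | v2/server_v2.py | _inject_into_code
-- ===== SOURCE A (Python) =====
-- def _encode_str_lua(s: str) -> str:
--     """Encode string as a Lua char-code table with position-based XOR.
--     Prevents trivial code.replace() sniffer bypass — string never appears in plaintext.
--     Decode in Lua:  for i=1,#t do s=s..string.char(t[i]~(((i-1)*17+5)%97+3)) end
--     """
--     result = []
--     for i, c in enumerate(s):
--         result.append(str(ord(c) ^ ((i * 17 + 5) % 97 + 3)))
--     return "{" + ",".join(result) + "}"
--
-- _PD_FUNC = (
--     # Use bit32.bxor (Roblox/Luau) or fall back to pure-Lua XOR (Lua 5.1 exploits).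
--     # `~` as binary XOR is Lua 5.3+ only and causes a loadstring syntax error on
--     # older exploit VMs, which is why the loader shows "Ошибка загрузки скрипта".
--     "local _xor=bit32 and bit32.bxor "
--     "or function(a,b) local r,p=0,1 while a>0 or b>0 do "
--     "if a%2~=b%2 then r=r+p end "
--     "a=math.floor(a/2) b=math.floor(b/2) p=p*2 end return r end\n"
--     "local function _pd(t) local s='' for i=1,#t do "
--     "s=s..string.char(_xor(t[i],((i-1)*17+5)%97+3)) end return s end\n"
-- )
--
-- def _inject_into_code(code: str, key: str, uid: str, api_url: str, token: str) -> str: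
--     """Inject user-specific values directly into the obfuscated code body.
--
--     Replaces every _G.__* read with an encoded literal and every _G.__* = nil
--     with a no-op. This means the script NEVER touches _G.* at runtime —
--     setting _G.__BOUND_UID = 'anything' from outside has zero effect.
--     """
--     replacements = [
--         # reads  →  encoded literal
--         ('_G.__LICENSE_KEY or ""',   f'_pd({_encode_str_lua(key)})'),
--         ('_G.__BOUND_UID or ""',     f'_pd({_encode_str_lua(uid)})'),
--         ('_G.__API_URL or ""',       f'_pd({_encode_str_lua(api_url)})'),
--         ('_G.__SESSION_TOKEN or ""', f'_pd({_encode_str_lua(token)})'),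
--         # clears  →  no-ops (keep semicolons so the one-liner doesn't break)
--         ('_G.__LICENSE_KEY=nil',   'local _lk=nil'),
--         ('_G.__BOUND_UID=nil',     'local _bu=nil'),
--         ('_G.__API_URL=nil',       'local _au=nil'),
--         ('_G.__SESSION_TOKEN=nil', 'local _st=nil'),
--     ]
--     for old, new in replacements:
--         code = code.replace(old, new)
--     # Prepend only the tiny decoder function — no _G.* globals at all
--     return _PD_FUNC + code
-- ===== SOURCE B (Python) =====
-- _PD_FUNC = (
--     "local _xor=bit32 and bit32.bxor "
--     "or function(a,b) local r,p=0,1 while a>0 or b>0 do "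
--     "if a%2~=b%2 then r=r+p end "
--     "a=math.floor(a/2) b=math.floor(b/2) p=p*2 end return r end\n"
--     "local function _pd(t) local s='' for i=1,#t do "
--     "s=s..string.char(_xor(t[i],((i-1)*17+5)%97+3)) end return s end\n"
-- )
--
--
-- def _lua_table(s):
--     # Index loop running back-to-front, then one reverse
--     # (same encoded literal as A's _encode_str_lua).
--     parts = []
--     i = len(s) - 1
--     while i >= 0:
--         parts.append(str(ord(s[i]) ^ ((i * 17 + 5) % 97 + 3)))
--         i -= 1
--     parts.reverse()
--     return "{" + ",".join(parts) + "}"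
--
--
-- def _inject_into_code(code, key, uid, api_url, token):
--     # One left-to-right pass: at each position try the eight patterns in order,
--     # emit the replacement and skip the match, else copy the character.
--     table = [
--         ('_G.__LICENSE_KEY or ""',   '_pd(' + _lua_table(key) + ')'),
--         ('_G.__BOUND_UID or ""',     '_pd(' + _lua_table(uid) + ')'),
--         ('_G.__API_URL or ""',       '_pd(' + _lua_table(api_url) + ')'),
--         ('_G.__SESSION_TOKEN or ""', '_pd(' + _lua_table(token) + ')'),
--         ('_G.__LICENSE_KEY=nil',   'local _lk=nil'),
--         ('_G.__BOUND_UID=nil',     'local _bu=nil'),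
--         ('_G.__API_URL=nil',       'local _au=nil'),
--         ('_G.__SESSION_TOKEN=nil', 'local _st=nil'),
--     ]
--     out = []
--     i = 0
--     n = len(code)
--     while i < n:
--         for old, new in table:
--             if code.startswith(old, i):
--                 out.append(new)
--                 i += len(old)
--                 break
--         else:
--             out.append(code[i])
--             i += 1
--     return _PD_FUNC + "".join(out)
-- ===== Notes on version B (the rewrite author's own statement) =====
-- stated objective: alternative
-- what changed: Replaces A's eight sequential full-string str.replace passes by a single left-to-right scan that tries the eight patterns at each position (emitting the replacement or one character), and the encoder is an index-recursive helper instead of an enumerate/append loop.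
import Mathlib
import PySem

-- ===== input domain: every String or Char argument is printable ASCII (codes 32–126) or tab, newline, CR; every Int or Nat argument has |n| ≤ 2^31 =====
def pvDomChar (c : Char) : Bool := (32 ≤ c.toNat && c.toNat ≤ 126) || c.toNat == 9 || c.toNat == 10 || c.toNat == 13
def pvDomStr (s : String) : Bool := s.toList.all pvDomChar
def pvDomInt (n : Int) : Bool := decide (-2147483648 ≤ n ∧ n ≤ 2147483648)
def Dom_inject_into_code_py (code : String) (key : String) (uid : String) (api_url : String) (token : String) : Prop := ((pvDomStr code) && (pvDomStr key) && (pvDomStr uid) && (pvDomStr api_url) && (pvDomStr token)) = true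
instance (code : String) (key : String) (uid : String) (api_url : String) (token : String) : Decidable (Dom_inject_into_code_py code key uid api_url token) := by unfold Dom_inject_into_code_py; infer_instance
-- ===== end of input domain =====

-- B replaces A's eight sequential full-string str.replace passes by one left-to-right scan
-- trying the eight patterns at each position, with an index-recursive encoder
-- (objective: alternative, same cost).

-- ===== PORT A =====
-- helper _encode_str_lua of A's module (enumerate + append loop, as in Source A)
def encode_str_lua (s : String) : String :=
  let result : List String :=
    (PySem.List.enumerate s.toList).foldl
      (fun acc ic =>
        acc ++ [PySem.Int.toStr (PySem.Int.bxor ((ic.2.toNat : Int)) (PySem.Int.mod (ic.1 * 17 + 5) 97 + 3))])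
      []
  "{" ++ PySem.Str.join "," result ++ "}"

-- module constant _PD_FUNC
def pdFunc : String := "local _xor=bit32 and bit32.bxor or function(a,b) local r,p=0,1 while a>0 or b>0 do if a%2~=b%2 then r=r+p end a=math.floor(a/2) b=math.floor(b/2) p=p*2 end return r end\nlocal function _pd(t) local s='' for i=1,#t do s=s..string.char(_xor(t[i],((i-1)*17+5)%97+3)) end return s end\n"

-- the `replacements` list of A
def replacements (key uid api_url token : String) : List (String × String) :=
  [("_G.__LICENSE_KEY or \"\"",   "_pd(" ++ encode_str_lua key ++ ")"),
   ("_G.__BOUND_UID or \"\"",     "_pd(" ++ encode_str_lua uid ++ ")"),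
   ("_G.__API_URL or \"\"",       "_pd(" ++ encode_str_lua api_url ++ ")"),
   ("_G.__SESSION_TOKEN or \"\"", "_pd(" ++ encode_str_lua token ++ ")"),
   ("_G.__LICENSE_KEY=nil",   "local _lk=nil"),
   ("_G.__BOUND_UID=nil",     "local _bu=nil"),
   ("_G.__API_URL=nil",       "local _au=nil"),
   ("_G.__SESSION_TOKEN=nil", "local _st=nil")]

-- for old, new in replacements: code = code.replace(old, new); return _PD_FUNC + code
def inject_into_code_py (code : String) (key : String) (uid : String) (api_url : String) (token : String) : String :=
  pdFunc ++ (replacements key uid api_url token).foldl (fun c pr => PySem.Str.replace c pr.1 pr.2) code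

-- ===== PORT B =====
-- Source B's back-to-front index loop inside _lua_table: encRev s n lists the encoded
-- pieces for indices n-1 down to 0 (Python's `parts` before the final reverse)
def encRev (s : List Char) : Nat → List String
  | 0 => []
  | n + 1 =>
    (if h : n < s.length then
      PySem.Int.toStr (PySem.Int.bxor ((s[n].toNat : Int)) (PySem.Int.mod ((n : Int) * 17 + 5) 97 + 3))
    else "") :: encRev s n

def luaTable (s : String) : String :=
  "{" ++ PySem.Str.join "," (encRev s.toList s.toList.length).reverse ++ "}"

-- Source B's _PD_FUNC (same module-level constant, written out in Source B)
def pdFuncB : String := "local _xor=bit32 and bit32.bxor or function(a,b) local r,p=0,1 while a>0 or b>0 do if a%2~=b%2 then r=r+p end a=math.floor(a/2) b=math.floor(b/2) p=p*2 end return r end\nlocal function _pd(t) local s='' for i=1,#t do s=s..string.char(_xor(t[i],((i-1)*17+5)%97+3)) end return s end\n"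

-- Source B's inline `table`, held as character lists for the scanner
def altTable (key uid api_url token : String) : List (List Char × List Char) :=
  [("_G.__LICENSE_KEY or \"\"".toList,   ("_pd(" ++ luaTable key ++ ")").toList),
   ("_G.__BOUND_UID or \"\"".toList,     ("_pd(" ++ luaTable uid ++ ")").toList),
   ("_G.__API_URL or \"\"".toList,       ("_pd(" ++ luaTable api_url ++ ")").toList),
   ("_G.__SESSION_TOKEN or \"\"".toList, ("_pd(" ++ luaTable token ++ ")").toList),
   ("_G.__LICENSE_KEY=nil".toList,   "local _lk=nil".toList),
   ("_G.__BOUND_UID=nil".toList,     "local _bu=nil".toList),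
   ("_G.__API_URL=nil".toList,       "local _au=nil".toList),
   ("_G.__SESSION_TOKEN=nil".toList, "local _st=nil".toList)]

-- Source B's single scan: at each position try the patterns in order; emit replacement and
-- skip the match, else copy one character.  The fuel argument (initially the length of
-- the scanned list) is only a totality device: every step consumes at least one
-- character, so fuel never runs out on the reachable calls.
def multiRepGo (tbl : List (List Char × List Char)) : Nat → List Char → List Char
  | _, [] => []
  | 0, _ => []
  | fuel + 1, c :: cs =>
    match tbl.find? (fun pr => pr.1.isPrefixOf (c :: cs)) with
    | some pr => pr.2 ++ multiRepGo tbl fuel (cs.drop (pr.1.length - 1))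
    | none => c :: multiRepGo tbl fuel cs

def inject_into_code_py_alt (code : String) (key : String) (uid : String) (api_url : String) (token : String) : String :=
  pdFuncB ++ String.ofList (multiRepGo (altTable key uid api_url token) code.toList.length code.toList)

-- ===== PRECONDITION & SPEC =====
-- Pre_ excludes code containing '=ni_G.__': only there can a '…=nil' replacement abut a
-- following '_G.__…' pattern, so that A's later replace passes rewrite an occurrence the
-- source never contained, while B's single pass leaves it — a corner of the cascading
-- str.replace order that neither behaviour specifies.
def Pre_inject_into_code_py (code : String) (key : String) (uid : String) (api_url : String) (token : String) : Prop :=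
  PySem.Str.isIn "=ni_G.__" code = false
instance (code : String) (key : String) (uid : String) (api_url : String) (token : String) : Decidable (Pre_inject_into_code_py code key uid api_url token) := by unfold Pre_inject_into_code_py; infer_instance

def pvWitness_inject_into_code_py : String × String × String × String × String :=
  ("local k=_G.__LICENSE_KEY or \"\"\n_G.__LICENSE_KEY=nil", "KEY-1", "42", "https://x", "tok")

def Spec_inject_into_code_py (code : String) (key : String) (uid : String) (api_url : String) (token : String) (out : String) : Prop := out = inject_into_code_py_alt code key uid api_url token
instance (code : String) (key : String) (uid : String) (api_url : String) (token : String) (out : String) : Decidable (Spec_inject_into_code_py code key uid api_url token out) := by unfold Spec_inject_into_code_py; infer_instance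

-- ===== CLAIM (what is proved, stated in full; the proofs are below) =====
def Claim_equal_inject_into_code_py : Prop := ∀ (code : String) (key : String) (uid : String) (api_url : String) (token : String), Dom_inject_into_code_py code key uid api_url token → Pre_inject_into_code_py code key uid api_url token → Spec_inject_into_code_py code key uid api_url token (inject_into_code_py code key uid api_url token)

-- ===== LEMMAS AND PROOFS =====

-- the boundary string whose absence Pre_ demands
def dangerL : List Char := "=ni_G.__".toList

def mr (tbl : List (List Char × List Char)) (l : List Char) : List Char :=
  multiRepGo tbl l.length l

lemma multiRepGo_fuel (tbl : List (List Char × List Char)) :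
    ∀ f1 : Nat, ∀ l : List Char, ∀ f2 : Nat, l.length ≤ f1 → l.length ≤ f2 →
      multiRepGo tbl f1 l = multiRepGo tbl f2 l := by
  intro f1
  induction f1 with
  | zero =>
    intro l f2 h1 _
    have : l = [] := List.length_eq_zero_iff.mp (Nat.le_zero.mp h1)
    subst this
    cases f2 <;> rfl
  | succ f ih =>
    intro l f2 h1 h2
    cases l with
    | nil => cases f2 <;> rfl
    | cons c cs =>
      cases f2 with
      | zero => simp at h2
      | succ f2' =>
        simp only [multiRepGo]
        cases hf : tbl.find? (fun pr => pr.1.isPrefixOf (c :: cs)) with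
        | none =>
          simp only []
          rw [ih cs f2' (by simp at h1 ⊢; omega) (by simp at h2 ⊢; omega)]
        | some pr =>
          simp only []
          rw [ih (cs.drop (pr.1.length - 1)) f2' (by simp at h1 ⊢; omega) (by simp at h2 ⊢; omega)]

lemma mr_cons_some (tbl : List (List Char × List Char)) (c : Char) (cs : List Char)
    (pr : List Char × List Char)
    (h : tbl.find? (fun pr => pr.1.isPrefixOf (c :: cs)) = some pr) :
    mr tbl (c :: cs) = pr.2 ++ mr tbl (cs.drop (pr.1.length - 1)) := by
  unfold mr
  simp only [List.length_cons, multiRepGo, h]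
  rw [multiRepGo_fuel tbl cs.length (cs.drop (pr.1.length - 1)) (cs.drop (pr.1.length - 1)).length (by simp) (le_refl _)]

lemma mr_cons_none (tbl : List (List Char × List Char)) (c : Char) (cs : List Char)
    (h : tbl.find? (fun pr => pr.1.isPrefixOf (c :: cs)) = none) :
    mr tbl (c :: cs) = c :: mr tbl cs := by
  unfold mr
  simp only [List.length_cons, multiRepGo, h]

lemma replace_go_eq_mr (old new : List Char) (hold : old ≠ []) :
    ∀ fuel : Nat, ∀ l acc : List Char, l.length ≤ fuel →
      PySem.Chars.replace.go old new fuel l acc = acc.reverse ++ mr [(old, new)] l := by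
  intro fuel
  induction fuel with
  | zero =>
    intro l acc h
    have : l = [] := List.length_eq_zero_iff.mp (Nat.le_zero.mp h)
    subst this
    simp [PySem.Chars.replace.go, mr, multiRepGo]
  | succ f ih =>
    intro l acc h
    cases l with
    | nil => simp [PySem.Chars.replace.go, mr, multiRepGo]
    | cons c cs =>
      simp only [PySem.Chars.replace.go]
      by_cases hp : old.isPrefixOf (c :: cs)
      · simp only [hp, if_true]
        have hrw : mr [(old, new)] (c :: cs) = new ++ mr [(old, new)] (cs.drop (old.length - 1)) := by
          have : ([(old, new)]).find? (fun pr => pr.1.isPrefixOf (c :: cs)) = some (old, new) := by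
            simp [List.find?, hp]
          simpa using mr_cons_some _ c cs (old, new) this
        have hdrop : (c :: cs).drop old.length = cs.drop (old.length - 1) := by
          cases old with
          | nil => exact absurd rfl hold
          | cons o os => simp
        rw [hdrop, ih (cs.drop (old.length - 1)) (new.reverse ++ acc)
          (by simp at h ⊢; omega), hrw]
        simp
      · simp only [hp, if_false]
        have hrw : mr [(old, new)] (c :: cs) = c :: mr [(old, new)] cs := by
          apply mr_cons_none
          simp [List.find?, hp]
        rw [ih cs (c :: acc) (by simp at h; omega), hrw]
        simp

lemma replace_eq_mr (l old new : List Char) (hold : old ≠ []) :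
    PySem.Chars.replace l old new = mr [(old, new)] l := by
  unfold PySem.Chars.replace
  have he : old.isEmpty = false := by
    cases old with
    | nil => exact absurd rfl hold
    | cons o os => rfl
  rw [he]
  have := replace_go_eq_mr old new hold l.length l [] (le_refl _)
  simpa using this

lemma prefix_append_cases {x u v : List Char} (h : x <+: u ++ v) :
    x <+: u ∨ (u <+: x ∧ x.drop u.length <+: v) := by
  rcases List.prefix_or_prefix_of_prefix h (List.prefix_append u v) with h1 | h1
  · exact Or.inl h1
  · right
    refine ⟨h1, ?_⟩
    rcases h with ⟨t, ht⟩
    rcases h1 with ⟨s, hs⟩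
    subst hs
    have : u.drop u.length ++ s.drop 0 <+: v := by
      have := ht
      rw [List.append_assoc] at ht
      have hst : s ++ t = v := (List.append_cancel_left ht)
      subst hst
      simpa using List.prefix_append s t
    simpa [List.drop_append] using this


lemma mr_copy (tbl : List (List Char × List Char)) :
    ∀ u v : List Char,
      (∀ k, k < u.length → tbl.find? (fun pr => pr.1.isPrefixOf (u.drop k ++ v)) = none) →
      mr tbl (u ++ v) = u ++ mr tbl v := by
  intro u
  induction u with
  | nil => intro v _; simp
  | cons c u' ih =>
    intro v h
    have h0 := h 0 (by simp)
    simp only [List.drop_zero] at h0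
    rw [List.cons_append, mr_cons_none tbl c (u' ++ v) (by simpa using h0)]
    rw [ih v (fun k hk => by simpa using h (k + 1) (by simpa using Nat.succ_lt_succ hk))]
    simp

def PairCond (p : List Char) (pr : List Char × List Char) : Prop :=
  (∀ k, k < pr.2.length → ¬ p <+: pr.2.drop k ∧ ¬ pr.2.drop k <+: p) ∧
  (∀ k, k < p.length → 0 < k →
      ¬ pr.2 <+: p.drop k ∧ (p.drop k <+: pr.2 → dangerL <:+: (p.take k ++ pr.1))) ∧
  (∀ j, j < p.length → 0 < j → ¬ pr.1 <+: p.drop j ∧ ¬ p.drop j <+: pr.1)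

def StepCond (tbl : List (List Char × List Char)) (p : List Char) : Prop :=
  p ≠ [] ∧ ∀ pr ∈ tbl, pr.1 ≠ [] ∧ PairCond p pr

def AllCond (rs : List (List Char × List Char)) : Prop :=
  ∀ i, (h : i < rs.length) → StepCond (rs.take i) (rs[i].1)

lemma prefix_append_casesX {x u v : List Char} (h : x <+: u ++ v) :
    x <+: u ∨ (u <+: x ∧ x.drop u.length <+: v) := prefix_append_cases h

lemma no_fresh_match (tbl : List (List Char × List Char)) (p : List Char)
    (H : ∀ pr ∈ tbl, pr.1 ≠ [] ∧
        (∀ k, k < p.length → 0 < k →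
          ¬ pr.2 <+: p.drop k ∧ (p.drop k <+: pr.2 → dangerL <:+: (p.take k ++ pr.1)))) :
    ∀ n : Nat, ∀ cs : List Char, ∀ k : Nat, cs.length ≤ n → 0 < k → k < p.length →
      ¬ dangerL <:+: (p.take k ++ cs) → p.drop k <+: mr tbl cs → p.drop k <+: cs := by
  intro n
  induction n with
  | zero =>
    intro cs k hlen hk hkp _ hpre
    have : cs = [] := List.length_eq_zero_iff.mp (Nat.le_zero.mp hlen)
    subst this
    simp [mr, multiRepGo] at hpre
    omega
  | succ n ih =>
    intro cs k hlen hk hkp hnd hpre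
    cases cs with
    | nil =>
      exfalso
      simp [mr, multiRepGo] at hpre
      omega
    | cons c cs' =>
      cases hf : tbl.find? (fun pr => pr.1.isPrefixOf (c :: cs')) with
      | some pr =>
        exfalso
        have hmem := List.mem_of_find?_eq_some hf
        have hq : pr.1.isPrefixOf (c :: cs') = true := by
          have := List.find?_some hf
          simpa using this
        rw [mr_cons_some tbl c cs' pr hf] at hpre
        rcases prefix_append_casesX hpre with h1 | h1
        · -- p.drop k <+: pr.2 : the danger string must occur, contradicting hnd
          have hdanger := ((H pr hmem).2 k hkp hk).2 h1
          apply hnd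
          -- dangerL <:+: p.take k ++ pr.1  and  pr.1 <+: c :: cs'
          have hq' : pr.1 <+: c :: cs' := by
            rw [List.isPrefixOf_iff_prefix] at hq; exact hq
          rcases hq' with ⟨t, ht⟩
          rcases hdanger with ⟨s1, s2, hs⟩
          refine ⟨s1, s2 ++ t, ?_⟩
          have h2 : (s1 ++ dangerL ++ s2) ++ t = (List.take k p ++ pr.1) ++ t := by rw [hs]
          rw [← ht]
          simpa [List.append_assoc] using h2
        · exact ((H pr hmem).2 k hkp hk).1 h1.1
      | none =>
        rw [mr_cons_none tbl c cs' hf] at hpre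
        -- p.drop k is nonempty
        have hne : p.drop k ≠ [] := by
          intro hcon
          have := congrArg List.length hcon
          simp at this
          omega
        have hdk : p.drop k = p[k] :: p.drop (k + 1) := List.drop_eq_getElem_cons hkp
        rw [hdk] at hpre
        rcases List.cons_prefix_cons.mp hpre with ⟨hc, htl⟩
        by_cases hk1 : k + 1 < p.length
        · have hnd' : ¬ dangerL <:+: (p.take (k + 1) ++ cs') := by
            intro hcon
            apply hnd
            have : p.take (k + 1) = p.take k ++ [p[k]] := by
              rw [List.take_succ]
              simp [List.getElem?_eq_getElem hkp]
            rw [this] at hcon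
            simpa [hc] using hcon
          have := ih cs' (k + 1) (by simpa using Nat.succ_le_succ_iff.mp (by simpa using hlen)) (by omega) hk1 hnd' htl
          rw [hdk, hc]
          exact List.cons_prefix_cons.mpr ⟨rfl, this⟩
        · -- k + 1 = p.length : p.drop k is the single char [p[k]] = [c]
          have : p.drop (k + 1) = [] := List.drop_eq_nil_of_le (by omega)
          rw [hdk, this, hc]
          simp

lemma mr_prefix_match (p r Y : List Char) (hp : p ≠ []) :
    mr [(p, r)] (p ++ Y) = r ++ mr [(p, r)] Y := by
  cases p with
  | nil => exact absurd rfl hp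
  | cons p0 p' =>
    have hb : (p0 :: p').isPrefixOf (p0 :: (p' ++ Y)) = true := by
      rw [List.isPrefixOf_iff_prefix]
      exact List.cons_prefix_cons.mpr ⟨rfl, List.prefix_append p' Y⟩
    have hfind : ([((p0 :: p' : List Char), r)]).find? (fun pr => pr.1.isPrefixOf (p0 :: (p' ++ Y))) = some (p0 :: p', r) := by
      simp [List.find?, hb]
    rw [List.cons_append, mr_cons_some _ _ _ _ hfind]
    simp

lemma infix_of_infix_suffix {d s l : List Char} (h : d <:+: s) (hs : s <:+ l) : d <:+: l :=
  h.trans hs.isInfix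

lemma step_lemma (tbl : List (List Char × List Char)) (p r : List Char)
    (hstep : StepCond tbl p) :
    ∀ n : Nat, ∀ l : List Char, l.length ≤ n → ¬ dangerL <:+: l →
      mr [(p, r)] (mr tbl l) = mr (tbl ++ [(p, r)]) l := by
  obtain ⟨hp, H⟩ := hstep
  intro n
  induction n with
  | zero =>
    intro l hlen _
    have : l = [] := List.length_eq_zero_iff.mp (Nat.le_zero.mp hlen)
    subst this
    rfl
  | succ n ih =>
    intro l hlen hnd
    cases l with
    | nil => rfl
    | cons c cs =>
      cases hf : tbl.find? (fun pr => pr.1.isPrefixOf (c :: cs)) with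
      | some pr =>
        have hmem := List.mem_of_find?_eq_some hf
        have hq : pr.1 <+: c :: cs := by
          have := List.find?_some hf
          rwa [List.isPrefixOf_iff_prefix] at this
        have hfind2 : (tbl ++ [(p, r)]).find? (fun pr => pr.1.isPrefixOf (c :: cs)) = some pr := by
          rw [List.find?_append, hf]; rfl
        rw [mr_cons_some tbl c cs pr hf, mr_cons_some _ c cs pr hfind2]
        set Y := mr tbl (cs.drop (pr.1.length - 1)) with hY
        have hcopy : mr [(p, r)] (pr.2 ++ Y) = pr.2 ++ mr [(p, r)] Y := by
          apply mr_copy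
          intro k hk
          rw [List.find?_eq_none]
          intro x hx
          simp at hx
          subst hx
          simp only [List.isPrefixOf_iff_prefix]
          intro hcon
          rcases prefix_append_casesX hcon with h1 | h1
          · exact ((H pr hmem).2.1 k hk).1 h1
          · exact ((H pr hmem).2.1 k hk).2 h1.1
        rw [hcopy]
        congr 1
        rw [hY]
        apply ih
        · have h1 : (List.drop (pr.1.length - 1) cs).length ≤ cs.length := by
            simp
          simp at hlen
          omega
        · intro hcon
          exact hnd (infix_of_infix_suffix hcon (((List.drop_suffix _ cs).trans (List.suffix_cons c cs))))
      | none =>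
        by_cases hpre : p <+: (c :: cs)
        · -- the fresh pattern matches at the head
          obtain ⟨t, ht⟩ := hpre
          have hcs : cs.drop (p.length - 1) = t := by
            have : (p ++ t).drop p.length = t := by simp
            rw [ht] at this
            cases p with
            | nil => exact absurd rfl hp
            | cons p0 p' => simpa using this
          have hcopy : mr tbl (p ++ t) = p ++ mr tbl t := by
            apply mr_copy
            intro k hk
            rw [List.find?_eq_none]
            intro x hx
            simp only [List.isPrefixOf_iff_prefix]
            intro hcon
            by_cases hk0 : k = 0
            · subst hk0
              have hall := List.find?_eq_none.mp hf x hx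
              apply hall
              rw [List.isPrefixOf_iff_prefix, ← ht]
              simpa using hcon
            · rcases prefix_append_casesX hcon with h1 | h1
              · exact ((H x hx).2.2.2 k hk (by omega)).1 h1
              · exact ((H x hx).2.2.2 k hk (by omega)).2 h1.1
          have hfind2 : (tbl ++ [(p, r)]).find? (fun pr => pr.1.isPrefixOf (c :: cs)) = some (p, r) := by
            have hb : p.isPrefixOf (c :: cs) = true := by
              rw [List.isPrefixOf_iff_prefix]; exact ⟨t, ht⟩
            rw [List.find?_append, hf]
            simp [List.find?, hb]
          rw [mr_cons_some _ c cs (p, r) hfind2]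
          rw [← ht, hcopy, mr_prefix_match p r _ hp]
          simp only [hcs]
          congr 1
          apply ih
          · have hl1 : p.length + t.length = cs.length + 1 := by
              have := congrArg List.length ht
              simpa using this
            have hp1 : 1 ≤ p.length := by
              cases p with
              | nil => exact absurd rfl hp
              | cons p0 p' => simp
            simp at hlen
            omega
          · intro hcon
            apply hnd
            refine infix_of_infix_suffix hcon ?_
            rw [← ht]
            exact (List.suffix_append p t)
        · -- nothing matches at the head
          have hfind2 : (tbl ++ [(p, r)]).find? (fun pr => pr.1.isPrefixOf (c :: cs)) = none := by
            have hb : p.isPrefixOf (c :: cs) = false := by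
              rw [← Bool.not_eq_true, List.isPrefixOf_iff_prefix]; exact hpre
            rw [List.find?_append, hf]
            simp [List.find?, hb]
          rw [mr_cons_none tbl c cs hf, mr_cons_none _ c cs hfind2]
          have hnofresh : ¬ p <+: (c :: mr tbl cs) := by
            intro hcon
            cases hpdef : p with
            | nil => exact hp hpdef
            | cons p0 p' =>
              subst hpdef
              rcases List.cons_prefix_cons.mp hcon with ⟨hc, htl⟩
              by_cases hlen1 : (p0 :: p').length = 1
              · have : p' = [] := by simpa using hlen1
                subst this
                apply hpre
                rw [hc]
                simpa using List.cons_prefix_cons.mpr ⟨rfl, List.nil_prefix⟩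
              · have hk1 : 1 < (p0 :: p').length := by
                  cases p' with
                  | nil => simp at hlen1
                  | cons a b => simp
                have hnd' : ¬ dangerL <:+: ((p0 :: p').take 1 ++ cs) := by
                  simpa [hc] using (fun hcon' => hnd (by
                    simpa [hc] using hcon' : dangerL <:+: (c :: cs)))
                have hdrop1 : (p0 :: p').drop 1 = p' := by simp
                have := no_fresh_match tbl (p0 :: p')
                  (fun pr hpr => ⟨(H pr hpr).1, (H pr hpr).2.2.1⟩)
                  cs.length cs 1 (le_refl _) (by omega) hk1 hnd' (by rw [hdrop1]; exact htl)
                apply hpre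
                rw [hc] at this ⊢
                exact List.cons_prefix_cons.mpr ⟨rfl, by simpa using this⟩
          have hhead : mr [(p, r)] (c :: mr tbl cs) = c :: mr [(p, r)] (mr tbl cs) := by
            apply mr_cons_none
            have hb : p.isPrefixOf (c :: mr tbl cs) = false := by
              rw [← Bool.not_eq_true, List.isPrefixOf_iff_prefix]; exact hnofresh
            simp [List.find?, hb]
          rw [hhead]
          congr 1
          apply ih
          · simp at hlen; omega
          · intro hcon
            exact hnd (infix_of_infix_suffix hcon (List.suffix_cons c cs))

lemma allCond_append {rs : List (List Char × List Char)} {pr : List Char × List Char}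
    (h : AllCond (rs ++ [pr])) : AllCond rs ∧ StepCond rs pr.1 := by
  constructor
  · intro i hi
    have hi' : i < (rs ++ [pr]).length := by simp; omega
    have := h i hi'
    rwa [List.take_append_of_le_length (by omega), List.getElem_append_left hi] at this
  · have hi' : rs.length < (rs ++ [pr]).length := by simp
    have := h rs.length hi'
    simpa using this

lemma comp_eq_mr (rs : List (List Char × List Char)) (hall : AllCond rs) :
    ∀ l : List Char, ¬ dangerL <:+: l →
      rs.foldl (fun c pr => mr [pr] c) l = mr rs l := by
  induction rs using List.reverseRecOn with
  | nil =>
    intro l hnd0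
    simp only [List.foldl_nil]
    induction l with
    | nil => rfl
    | cons c cs ihl =>
      rw [mr_cons_none ([]) c cs rfl,
        ← ihl (fun hc => hnd0 (infix_of_infix_suffix hc (List.suffix_cons c cs)))]
  | append_singleton rs pr ih =>
    intro l hnd
    obtain ⟨h1, h2⟩ := allCond_append hall
    rw [List.foldl_append]
    simp only [List.foldl_cons, List.foldl_nil]
    rw [ih h1 l hnd]
    have := step_lemma rs pr.1 pr.2 h2 l.length l (le_refl _) hnd
    simpa using this

def EncChar (c : Char) : Prop := c.isDigit = true ∨ c = ','

def PdRep (r : List Char) : Prop :=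
  ∃ e : List Char, r = ['_', 'p', 'd', '(', '{'] ++ e ++ ['}', ')'] ∧ ∀ c ∈ e, EncChar c

def PdChar (c : Char) : Prop :=
  c = '_' ∨ c = 'p' ∨ c = 'd' ∨ c = '(' ∨ c = '{' ∨ c = '}' ∨ c = ')' ∨ EncChar c

lemma digitChar_isDigit (m : Nat) (h : m < 10) : (Nat.digitChar m).isDigit = true := by
  interval_cases m <;> decide

lemma toDigits_isDigit (n : Nat) : ∀ c ∈ Nat.toDigits 10 n, c.isDigit = true := by
  have core : ∀ fuel n ds, (∀ c ∈ ds, Char.isDigit c = true) →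
      ∀ c ∈ Nat.toDigitsCore 10 fuel n ds, c.isDigit = true := by
    intro fuel
    induction fuel with
    | zero => intro n ds hds c hc; exact hds c hc
    | succ f ih =>
      intro n ds hds c hc
      simp only [Nat.toDigitsCore] at hc
      have hd : ((n % 10).digitChar).isDigit = true :=
        digitChar_isDigit _ (Nat.mod_lt _ (by norm_num))
      by_cases h0 : n / 10 = 0
      · rw [if_pos h0] at hc
        rcases List.mem_cons.mp hc with h | h
        · subst h; exact hd
        · exact hds c h
      · rw [if_neg h0] at hc
        exact ih _ _ (by
          intro c' hc'
          rcases List.mem_cons.mp hc' with h | h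
          · subst h; exact hd
          · exact hds c' h) c hc
  intro c hc
  exact core _ _ _ (by simp) c hc

lemma toChars_isDigit (n : Int) (h : 0 ≤ n) : ∀ c ∈ PySem.Int.toChars n, c.isDigit = true := by
  unfold PySem.Int.toChars
  rw [if_neg (by omega)]
  exact toDigits_isDigit n.toNat

lemma mem_intersperse_aux (sep : List Char) :
    ∀ parts : List (List Char), ∀ l : List Char,
      l ∈ List.intersperse sep parts → l ∈ parts ∨ l = sep := by
  intro parts
  induction parts with
  | nil => simp
  | cons p ps ih =>
    intro l hl
    cases ps with
    | nil =>
      simp at hl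
      subst hl
      simp
    | cons q qs =>
      rw [List.intersperse_cons₂] at hl
      rcases List.mem_cons.mp hl with h | h
      · subst h; simp
      · rcases List.mem_cons.mp h with h' | h'
        · right; exact h'
        · rcases ih l h' with h2 | h2
          · left; exact List.mem_cons_of_mem _ h2
          · right; exact h2

-- reversing B's back-to-front piece list gives A's enumerate map, entry for entry
lemma encRev_reverse_eq_map (l : List Char) :
    ∀ n : Nat, n ≤ l.length →
      (encRev l n).reverse = (PySem.List.enumerate (l.take n)).map
        (fun ic => PySem.Int.toStr (PySem.Int.bxor ((ic.2.toNat : Int)) (PySem.Int.mod (ic.1 * 17 + 5) 97 + 3))) := by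
  intro n
  induction n with
  | zero => intro _; simp [encRev, PySem.List.enumerate_nil]
  | succ n ih =>
    intro h
    have hn : n < l.length := by omega
    rw [encRev, List.reverse_cons, ih (by omega), dif_pos hn]
    rw [List.take_succ, List.getElem?_eq_getElem hn]
    simp only [Option.toList_some, PySem.List.enumerate_append, List.map_append]
    congr 1
    rw [PySem.List.enumerate_cons, PySem.List.enumerate_nil]
    simp [List.length_take, Nat.min_eq_left (Nat.le_of_lt hn)]

lemma luaTable_eq (s : String) : luaTable s = encode_str_lua s := by
  unfold luaTable encode_str_lua
  rw [PySem.List.foldl_append_singleton_eq_map]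
  rw [encRev_reverse_eq_map s.toList s.toList.length (le_refl _), List.take_length]
  simp

lemma altTable_eq (key uid api_url token : String) :
    altTable key uid api_url token =
      (replacements key uid api_url token).map (fun pr => (pr.1.toList, pr.2.toList)) := by
  unfold altTable replacements
  simp [luaTable_eq]

lemma pdRep_encode (s : String) : PdRep ("_pd(" ++ encode_str_lua s ++ ")").toList := by
  unfold encode_str_lua
  simp only []
  refine ⟨(PySem.Str.join ","
      ((PySem.List.enumerate s.toList).map
        (fun ic => PySem.Int.toStr (PySem.Int.bxor ((ic.2.toNat : Int)) (PySem.Int.mod (ic.1 * 17 + 5) 97 + 3))))).toList,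
    ?_, ?_⟩
  · rw [PySem.List.foldl_append_singleton_eq_map]
    have h1 : "_pd(".toList = ['_', 'p', 'd', '('] := by decide
    have h2 : "{".toList = ['{'] := by decide
    have h3 : "}".toList = ['}'] := by decide
    have h4 : ")".toList = [')'] := by decide
    simp [String.toList_append, h1, h2, h3, h4]
  · intro c hc
    rw [PySem.Str.toList_join] at hc
    have h5 : ",".toList = [','] := by decide
    rw [h5] at hc
    simp only [PySem.Chars.join, List.intercalate] at hc
    rcases List.mem_flatten.mp hc with ⟨l, hl, hcl⟩
    rcases mem_intersperse_aux _ _ _ hl with h1 | h1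
    · -- l is a joined string piece
      rcases List.mem_map.mp h1 with ⟨t, ht, htl⟩
      rcases List.mem_map.mp ht with ⟨ic, _, hic⟩
      subst htl
      subst hic
      left
      rw [PySem.Int.toList_toStr] at hcl
      refine toChars_isDigit _ ?_ c hcl
      have hm : (0 : Int) ≤ PySem.Int.mod (ic.1 * 17 + 5) 97 + 3 := by
        have := PySem.Int.mod_nonneg (ic.1 * 17 + 5) (b := 97) (by norm_num)
        omega
      have ho : (0 : Int) ≤ (ic.2.toNat : Int) := by positivity
      rw [PySem.Int.bxor_of_nonneg ho hm]
      positivity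
    · right
      rw [h1] at hcl
      simpa using hcl

lemma encChar_ne {c : Char} (h : EncChar c) :
    c ≠ '_' ∧ c ≠ 'G' ∧ c ≠ '"' ∧ c ≠ 'l' ∧ c ≠ 'p' := by
  rcases h with h | h
  · refine ⟨?_, ?_, ?_, ?_, ?_⟩ <;> (rintro rfl; simp [Char.isDigit] at h)
  · subst h; decide

lemma pdRep_mem {r : List Char} (hr : PdRep r) : ∀ c ∈ r, PdChar c := by
  rcases hr with ⟨e, rfl, he⟩
  intro c hc
  have hc' : c = '_' ∨ c = 'p' ∨ c = 'd' ∨ c = '(' ∨ c = '{' ∨ c ∈ e ∨ c = '}' ∨ c = ')' := by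
    simpa using hc
  unfold PdChar
  rcases hc' with h|h|h|h|h|h|h|h
  all_goals first
  | (exact Or.inr (Or.inr (Or.inr (Or.inr (Or.inr (Or.inr (Or.inr (he c h))))))))
  | tauto

lemma pdChar_ne {c : Char} (h : PdChar c) : c ≠ 'G' ∧ c ≠ '"' ∧ c ≠ 'l' := by
  rcases h with h | h | h | h | h | h | h | h
  · subst h; decide
  · subst h; decide
  · subst h; decide
  · subst h; decide
  · subst h; decide
  · subst h; decide
  · subst h; decide
  · have := encChar_ne h; exact ⟨this.2.1, this.2.2.1, this.2.2.2.1⟩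

lemma pdRep_get0 {r : List Char} (hr : PdRep r) : r[0]? = some '_' := by
  rcases hr with ⟨e, rfl, _⟩; rfl

lemma pdRep_get1 {r : List Char} (hr : PdRep r) : r[1]? = some 'p' := by
  rcases hr with ⟨e, rfl, _⟩; rfl

lemma pdRep_underscore {r : List Char} (hr : PdRep r) {k : Nat}
    (h : r[k]? = some '_') : k = 0 := by
  rcases hr with ⟨e, hre, he⟩
  by_contra hk
  have hk1 : 1 ≤ k := by omega
  have hre' : r = ('_' : Char) :: (['p', 'd', '(', '{'] ++ e ++ ['}', ')']) := by
    rw [hre]; simp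
  have hmem : '_' ∈ (['p', 'd', '(', '{'] ++ e ++ ['}', ')'] : List Char) := by
    rw [hre'] at h
    rcases k with _ | k'
    · omega
    · simp only [List.getElem?_cons_succ] at h
      exact List.mem_of_getElem? h
  simp only [List.mem_append, List.mem_cons] at hmem
  rcases hmem with (h1 | h1) | h1
  · rcases h1 with h1 | h1 | h1 | h1 <;> simp at h1
  · exact (encChar_ne (he _ h1)).1 rfl
  · rcases h1 with h1 | h1 <;> simp at h1

lemma prefix_getElem? {u v : List Char} (h : u <+: v) {i : Nat} {a : Char}
    (hi : u[i]? = some a) : v[i]? = some a := by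
  rcases h with ⟨t, rfl⟩
  rw [List.getElem?_append_left (List.getElem?_eq_some_iff.mp hi).1]
  exact hi

lemma pairCond_pd (p q r : List Char) (hr : PdRep r)
    (h0 : p[0]? = some '_') (h1 : p[1]? = some 'G')
    (noUP : ∀ k, k < p.length → 0 < k → ¬ (p[k]? = some '_' ∧ p[k + 1]? = some 'p'))
    (hlast : p.getLast? = some '"' ∨ p.getLast? = some 'l')
    (H4 : ∀ j, j < p.length → 0 < j → ¬ q <+: p.drop j ∧ ¬ p.drop j <+: q) :
    PairCond p (q, r) := by
  refine ⟨?_, ?_, H4⟩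
  · intro k hk
    constructor
    · intro hcon
      have hG : 'G' ∈ p := List.mem_of_getElem? h1
      have : 'G' ∈ r := List.drop_subset k r (hcon.subset hG)
      exact (pdChar_ne (pdRep_mem hr _ this)).1 rfl
    · intro hcon
      have hk' : k < r.length := hk
      have hlt : 0 < (r.drop k).length := by simp; omega
      have hx : (r.drop k)[0]? = some ((r.drop k)[0]'hlt) := List.getElem?_eq_getElem hlt
      have hdrop0 : (List.drop k r)[0]? = r[k]? := by
        simpa using (List.getElem?_drop (xs := r) (i := k) (j := 0))
      have h0' : r[k]? = some '_' := by
        rw [← hdrop0, hx]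
        have h00 := prefix_getElem? hcon hx
        rw [h0] at h00
        exact h00.symm
      have hk00 : k = 0 := pdRep_underscore hr h0'
      subst hk00
      simp only [List.drop_zero] at hcon
      have := prefix_getElem? hcon (pdRep_get1 hr)
      rw [h1] at this
      simp at this
  · intro k hk hk0
    constructor
    · intro hcon
      apply noUP k hk hk0
      constructor
      · have := prefix_getElem? hcon (pdRep_get0 hr)
        rwa [List.getElem?_drop, Nat.add_zero] at this
      · have := prefix_getElem? hcon (pdRep_get1 hr)
        rwa [List.getElem?_drop] at this
    · intro hcon
      exfalso
      have hne : p.drop k ≠ [] := by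
        intro hnil
        have := congrArg List.length hnil
        simp at this
        omega
      have hlastd : (p.drop k).getLast? = p.getLast? := by
        rw [List.getLast?_drop, if_neg (by omega)]
      rcases hlast with hl | hl
      · have hmem : '"' ∈ p.drop k := List.mem_of_getLast? (by rw [hlastd]; exact hl)
        have : '"' ∈ r := hcon.subset hmem
        exact (pdChar_ne (pdRep_mem hr _ this)).2.1 rfl
      · have hmem : 'l' ∈ p.drop k := List.mem_of_getLast? (by rw [hlastd]; exact hl)
        have : 'l' ∈ r := hcon.subset hmem
        exact (pdChar_ne (pdRep_mem hr _ this)).2.2 rfl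

lemma allCond_table (key uid api_url token : String) :
    AllCond ((replacements key uid api_url token).map (fun pr => (pr.1.toList, pr.2.toList))) := by
  intro i hi
  simp only [replacements, List.map, List.length_cons, List.length_nil] at hi ⊢
  interval_cases i
  · show StepCond [] ("_G.__LICENSE_KEY or \"\"".toList)
    refine ⟨by decide, ?_⟩
    intro pr hpr
    simp at hpr
  · show StepCond [("_G.__LICENSE_KEY or \"\"".toList, ("_pd(" ++ encode_str_lua key ++ ")").toList)] ("_G.__BOUND_UID or \"\"".toList)
    refine ⟨by decide, ?_⟩
    intro pr hpr
    simp only [List.mem_cons, List.not_mem_nil, or_false] at hpr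
    rcases hpr with rfl
    · exact ⟨by show ("_G.__LICENSE_KEY or \"\"".toList : List Char) ≠ []; decide,
        pairCond_pd _ _ _ (pdRep_encode key)
        (by decide) (by decide) (by decide) (by decide) (by decide)⟩
  · show StepCond [("_G.__LICENSE_KEY or \"\"".toList, ("_pd(" ++ encode_str_lua key ++ ")").toList), ("_G.__BOUND_UID or \"\"".toList, ("_pd(" ++ encode_str_lua uid ++ ")").toList)] ("_G.__API_URL or \"\"".toList)
    refine ⟨by decide, ?_⟩
    intro pr hpr
    simp only [List.mem_cons, List.not_mem_nil, or_false] at hpr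
    rcases hpr with rfl|rfl
    · exact ⟨by show ("_G.__LICENSE_KEY or \"\"".toList : List Char) ≠ []; decide,
        pairCond_pd _ _ _ (pdRep_encode key)
        (by decide) (by decide) (by decide) (by decide) (by decide)⟩
    · exact ⟨by show ("_G.__BOUND_UID or \"\"".toList : List Char) ≠ []; decide,
        pairCond_pd _ _ _ (pdRep_encode uid)
        (by decide) (by decide) (by decide) (by decide) (by decide)⟩
  · show StepCond [("_G.__LICENSE_KEY or \"\"".toList, ("_pd(" ++ encode_str_lua key ++ ")").toList), ("_G.__BOUND_UID or \"\"".toList, ("_pd(" ++ encode_str_lua uid ++ ")").toList), ("_G.__API_URL or \"\"".toList, ("_pd(" ++ encode_str_lua api_url ++ ")").toList)] ("_G.__SESSION_TOKEN or \"\"".toList)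
    refine ⟨by decide, ?_⟩
    intro pr hpr
    simp only [List.mem_cons, List.not_mem_nil, or_false] at hpr
    rcases hpr with rfl|rfl|rfl
    · exact ⟨by show ("_G.__LICENSE_KEY or \"\"".toList : List Char) ≠ []; decide,
        pairCond_pd _ _ _ (pdRep_encode key)
        (by decide) (by decide) (by decide) (by decide) (by decide)⟩
    · exact ⟨by show ("_G.__BOUND_UID or \"\"".toList : List Char) ≠ []; decide,
        pairCond_pd _ _ _ (pdRep_encode uid)
        (by decide) (by decide) (by decide) (by decide) (by decide)⟩
    · exact ⟨by show ("_G.__API_URL or \"\"".toList : List Char) ≠ []; decide,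
        pairCond_pd _ _ _ (pdRep_encode api_url)
        (by decide) (by decide) (by decide) (by decide) (by decide)⟩
  · show StepCond [("_G.__LICENSE_KEY or \"\"".toList, ("_pd(" ++ encode_str_lua key ++ ")").toList), ("_G.__BOUND_UID or \"\"".toList, ("_pd(" ++ encode_str_lua uid ++ ")").toList), ("_G.__API_URL or \"\"".toList, ("_pd(" ++ encode_str_lua api_url ++ ")").toList), ("_G.__SESSION_TOKEN or \"\"".toList, ("_pd(" ++ encode_str_lua token ++ ")").toList)] ("_G.__LICENSE_KEY=nil".toList)
    refine ⟨by decide, ?_⟩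
    intro pr hpr
    simp only [List.mem_cons, List.not_mem_nil, or_false] at hpr
    rcases hpr with rfl|rfl|rfl|rfl
    · exact ⟨by show ("_G.__LICENSE_KEY or \"\"".toList : List Char) ≠ []; decide,
        pairCond_pd _ _ _ (pdRep_encode key)
        (by decide) (by decide) (by decide) (by decide) (by decide)⟩
    · exact ⟨by show ("_G.__BOUND_UID or \"\"".toList : List Char) ≠ []; decide,
        pairCond_pd _ _ _ (pdRep_encode uid)
        (by decide) (by decide) (by decide) (by decide) (by decide)⟩
    · exact ⟨by show ("_G.__API_URL or \"\"".toList : List Char) ≠ []; decide,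
        pairCond_pd _ _ _ (pdRep_encode api_url)
        (by decide) (by decide) (by decide) (by decide) (by decide)⟩
    · exact ⟨by show ("_G.__SESSION_TOKEN or \"\"".toList : List Char) ≠ []; decide,
        pairCond_pd _ _ _ (pdRep_encode token)
        (by decide) (by decide) (by decide) (by decide) (by decide)⟩
  · show StepCond [("_G.__LICENSE_KEY or \"\"".toList, ("_pd(" ++ encode_str_lua key ++ ")").toList), ("_G.__BOUND_UID or \"\"".toList, ("_pd(" ++ encode_str_lua uid ++ ")").toList), ("_G.__API_URL or \"\"".toList, ("_pd(" ++ encode_str_lua api_url ++ ")").toList), ("_G.__SESSION_TOKEN or \"\"".toList, ("_pd(" ++ encode_str_lua token ++ ")").toList), ("_G.__LICENSE_KEY=nil".toList, "local _lk=nil".toList)] ("_G.__BOUND_UID=nil".toList)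
    refine ⟨by decide, ?_⟩
    intro pr hpr
    simp only [List.mem_cons, List.not_mem_nil, or_false] at hpr
    rcases hpr with rfl|rfl|rfl|rfl|rfl
    · exact ⟨by show ("_G.__LICENSE_KEY or \"\"".toList : List Char) ≠ []; decide,
        pairCond_pd _ _ _ (pdRep_encode key)
        (by decide) (by decide) (by decide) (by decide) (by decide)⟩
    · exact ⟨by show ("_G.__BOUND_UID or \"\"".toList : List Char) ≠ []; decide,
        pairCond_pd _ _ _ (pdRep_encode uid)
        (by decide) (by decide) (by decide) (by decide) (by decide)⟩
    · exact ⟨by show ("_G.__API_URL or \"\"".toList : List Char) ≠ []; decide,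
        pairCond_pd _ _ _ (pdRep_encode api_url)
        (by decide) (by decide) (by decide) (by decide) (by decide)⟩
    · exact ⟨by show ("_G.__SESSION_TOKEN or \"\"".toList : List Char) ≠ []; decide,
        pairCond_pd _ _ _ (pdRep_encode token)
        (by decide) (by decide) (by decide) (by decide) (by decide)⟩
    · exact ⟨by decide, by unfold PairCond dangerL; decide⟩
  · show StepCond [("_G.__LICENSE_KEY or \"\"".toList, ("_pd(" ++ encode_str_lua key ++ ")").toList), ("_G.__BOUND_UID or \"\"".toList, ("_pd(" ++ encode_str_lua uid ++ ")").toList), ("_G.__API_URL or \"\"".toList, ("_pd(" ++ encode_str_lua api_url ++ ")").toList), ("_G.__SESSION_TOKEN or \"\"".toList, ("_pd(" ++ encode_str_lua token ++ ")").toList), ("_G.__LICENSE_KEY=nil".toList, "local _lk=nil".toList), ("_G.__BOUND_UID=nil".toList, "local _bu=nil".toList)] ("_G.__API_URL=nil".toList)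
    refine ⟨by decide, ?_⟩
    intro pr hpr
    simp only [List.mem_cons, List.not_mem_nil, or_false] at hpr
    rcases hpr with rfl|rfl|rfl|rfl|rfl|rfl
    · exact ⟨by show ("_G.__LICENSE_KEY or \"\"".toList : List Char) ≠ []; decide,
        pairCond_pd _ _ _ (pdRep_encode key)
        (by decide) (by decide) (by decide) (by decide) (by decide)⟩
    · exact ⟨by show ("_G.__BOUND_UID or \"\"".toList : List Char) ≠ []; decide,
        pairCond_pd _ _ _ (pdRep_encode uid)
        (by decide) (by decide) (by decide) (by decide) (by decide)⟩
    · exact ⟨by show ("_G.__API_URL or \"\"".toList : List Char) ≠ []; decide,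
        pairCond_pd _ _ _ (pdRep_encode api_url)
        (by decide) (by decide) (by decide) (by decide) (by decide)⟩
    · exact ⟨by show ("_G.__SESSION_TOKEN or \"\"".toList : List Char) ≠ []; decide,
        pairCond_pd _ _ _ (pdRep_encode token)
        (by decide) (by decide) (by decide) (by decide) (by decide)⟩
    · exact ⟨by decide, by unfold PairCond dangerL; decide⟩
    · exact ⟨by decide, by unfold PairCond dangerL; decide⟩
  · show StepCond [("_G.__LICENSE_KEY or \"\"".toList, ("_pd(" ++ encode_str_lua key ++ ")").toList), ("_G.__BOUND_UID or \"\"".toList, ("_pd(" ++ encode_str_lua uid ++ ")").toList), ("_G.__API_URL or \"\"".toList, ("_pd(" ++ encode_str_lua api_url ++ ")").toList), ("_G.__SESSION_TOKEN or \"\"".toList, ("_pd(" ++ encode_str_lua token ++ ")").toList), ("_G.__LICENSE_KEY=nil".toList, "local _lk=nil".toList), ("_G.__BOUND_UID=nil".toList, "local _bu=nil".toList), ("_G.__API_URL=nil".toList, "local _au=nil".toList)] ("_G.__SESSION_TOKEN=nil".toList)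
    refine ⟨by decide, ?_⟩
    intro pr hpr
    simp only [List.mem_cons, List.not_mem_nil, or_false] at hpr
    rcases hpr with rfl|rfl|rfl|rfl|rfl|rfl|rfl
    · exact ⟨by show ("_G.__LICENSE_KEY or \"\"".toList : List Char) ≠ []; decide,
        pairCond_pd _ _ _ (pdRep_encode key)
        (by decide) (by decide) (by decide) (by decide) (by decide)⟩
    · exact ⟨by show ("_G.__BOUND_UID or \"\"".toList : List Char) ≠ []; decide,
        pairCond_pd _ _ _ (pdRep_encode uid)
        (by decide) (by decide) (by decide) (by decide) (by decide)⟩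
    · exact ⟨by show ("_G.__API_URL or \"\"".toList : List Char) ≠ []; decide,
        pairCond_pd _ _ _ (pdRep_encode api_url)
        (by decide) (by decide) (by decide) (by decide) (by decide)⟩
    · exact ⟨by show ("_G.__SESSION_TOKEN or \"\"".toList : List Char) ≠ []; decide,
        pairCond_pd _ _ _ (pdRep_encode token)
        (by decide) (by decide) (by decide) (by decide) (by decide)⟩
    · exact ⟨by decide, by unfold PairCond dangerL; decide⟩
    · exact ⟨by decide, by unfold PairCond dangerL; decide⟩
    · exact ⟨by decide, by unfold PairCond dangerL; decide⟩

lemma foldl_replace_toList (code : String) (rs : List (String × String))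
    (h : ∀ pr ∈ rs, pr.1.toList ≠ []) :
    (rs.foldl (fun c pr => PySem.Str.replace c pr.1 pr.2) code).toList =
      (rs.map (fun pr => (pr.1.toList, pr.2.toList))).foldl (fun c pr => mr [pr] c) code.toList := by
  induction rs generalizing code with
  | nil => rfl
  | cons pr rs ih =>
    simp only [List.foldl_cons, List.map]
    rw [ih _ (fun x hx => h x (List.mem_cons_of_mem _ hx))]
    congr 1
    rw [PySem.Str.toList_replace]
    exact replace_eq_mr _ _ _ (h pr (List.mem_cons_self))

-- ===== VERDICT (by name: the statement is the Claim_ definition above) =====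
theorem inject_into_code_py_spec : Claim_equal_inject_into_code_py := by
  intro code key uid api_url token _hdom hpre
  unfold Spec_inject_into_code_py
  unfold Pre_inject_into_code_py at hpre
  have hnd : ¬ dangerL <:+: code.toList := by
    rw [PySem.Str.isIn_eq] at hpre
    exact (PySem.Chars.isIn_eq_false_iff _ _).mp hpre
  have h2 : ((replacements key uid api_url token).foldl
      (fun c pr => PySem.Str.replace c pr.1 pr.2) code).toList =
      multiRepGo (altTable key uid api_url token) code.toList.length code.toList := by
    rw [foldl_replace_toList code _ (by
      intro pr hpr
      simp only [replacements, List.mem_cons, List.not_mem_nil, or_false] at hpr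
      rcases hpr with rfl|rfl|rfl|rfl|rfl|rfl|rfl|rfl <;> simp)]
    rw [comp_eq_mr _ (allCond_table key uid api_url token) code.toList hnd]
    rw [altTable_eq]
    rfl
  unfold inject_into_code_py inject_into_code_py_alt
  rw [← String.toList_inj]
  have hpd : pdFunc = pdFuncB := rfl
  simp only [String.toList_append, String.toList_ofList, h2, hpd]
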